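-- pv_equiv track=rewrite | github.com/lovebuilt/n8n-autoscaling | custom/build.py | inject_copies
-- ===== SOURCE A (Python) =====
-- def inject_copies(content, share_copies, bin_copies):
--     """Add custom COPY --from=builder lines after existing ones."""
--     if not share_copies and not bin_copies:
--         return content
--     lines = content.split('\n')
--     last_copy_idx = max(
--         (i for i, l in enumerate(lines) if 'COPY --from=builder' in l),
--         default=-1
--     )
--     if last_copy_idx == -1:
--         return content
--     result = lines[:last_copy_idx + 1]
--     result.append('# === YOUR CUSTOM COPIES (from custom/config.json) ===')
--     for src in share_copies:
--         result.append(f'COPY --from=builder {src} {src}')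
--     for b in bin_copies:
--         result.append(f'COPY --from=builder {b} {b}')
--     result.extend(lines[last_copy_idx + 1:])
--     return '\n'.join(result)
-- ===== SOURCE B (Python) =====
-- def inject_copies(content, share_copies, bin_copies):
--     """Add custom COPY --from=builder lines after existing ones.
--     Single backward pass: walk the lines in reverse, emit the custom block
--     just before the first builder-COPY line seen (i.e. after the last one),
--     then reverse the result."""
--     if not share_copies and not bin_copies:
--         return content
--     block = ['# === YOUR CUSTOM COPIES (from custom/config.json) ===']
--     block += ['COPY --from=builder %s %s' % (x, x) for x in share_copies]
--     block += ['COPY --from=builder %s %s' % (x, x) for x in bin_copies]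
--     rev_out = []
--     inserted = False
--     for line in reversed(content.split('\n')):
--         if not inserted and 'COPY --from=builder' in line:
--             rev_out.extend(reversed(block))
--             inserted = True
--         rev_out.append(line)
--     if not inserted:
--         return content
--     rev_out.reverse()
--     return '\n'.join(rev_out)
-- ===== Notes on version B (the rewrite author's own statement) =====
-- stated objective: alternative
-- what changed: Instead of computing the max matching index over an enumerate pass and then concatenating two slices, B walks the lines once in reverse, splices the reversed custom block in front of the first builder-COPY line it sees, and reverses the accumulated result.
import Mathlib
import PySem

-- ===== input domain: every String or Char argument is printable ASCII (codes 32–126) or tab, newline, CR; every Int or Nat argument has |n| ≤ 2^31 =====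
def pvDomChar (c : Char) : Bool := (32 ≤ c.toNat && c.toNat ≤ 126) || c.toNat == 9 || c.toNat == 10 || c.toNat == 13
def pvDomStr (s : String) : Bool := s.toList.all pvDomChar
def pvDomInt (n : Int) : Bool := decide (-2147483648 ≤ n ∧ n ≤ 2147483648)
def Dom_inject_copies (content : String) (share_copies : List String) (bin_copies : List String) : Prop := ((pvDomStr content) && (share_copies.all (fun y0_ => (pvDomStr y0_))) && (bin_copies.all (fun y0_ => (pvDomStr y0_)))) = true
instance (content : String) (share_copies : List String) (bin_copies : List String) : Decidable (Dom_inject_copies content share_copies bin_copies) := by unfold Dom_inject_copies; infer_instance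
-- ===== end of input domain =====

-- B replaces A's enumerate-max-then-two-slices construction by one backward pass over the lines that splices the block in as it goes; same cost, different traversal.

-- ===== PORT A =====
-- f'COPY --from=builder {src} {src}' (shared literal of both Pythons)
def copyLine (s : String) : String := "COPY --from=builder " ++ s ++ " " ++ s

def inject_copies (content : String) (share_copies : List String) (bin_copies : List String) : String :=
  if share_copies = [] ∧ bin_copies = [] then content
  else
    -- "\n" is a nonempty separator, so split? is always `some`
    let lines := (PySem.Str.split? content "\n").getD []
    let last_copy_idx : Int :=
      (PySem.List.max?
        ((PySem.List.enumerate lines 0).filterMap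
          (fun il => if PySem.Str.isIn "COPY --from=builder" il.2 then some il.1 else none))
        (fun x => x)).getD (-1)
    if last_copy_idx = -1 then content
    else
      let result :=
        PySem.List.slice lines none (some (last_copy_idx + 1))
        ++ ["# === YOUR CUSTOM COPIES (from custom/config.json) ==="]
        ++ share_copies.map copyLine
        ++ bin_copies.map copyLine
        ++ PySem.List.slice lines (some (last_copy_idx + 1)) none
      PySem.Str.join "\n" result

-- ===== PORT B =====
-- the reverse-pass loop of Source B: acc is rev_out, the Bool is `inserted`
def altGo (block : List String) : List String → List String → Bool → List String × Bool
  | [], acc, inserted => (acc, inserted)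
  | l :: rest, acc, inserted =>
    if !inserted && PySem.Str.isIn "COPY --from=builder" l then
      altGo block rest (acc ++ block.reverse ++ [l]) true
    else
      altGo block rest (acc ++ [l]) inserted

def inject_copies_alt (content : String) (share_copies : List String) (bin_copies : List String) : String :=
  if share_copies = [] ∧ bin_copies = [] then content
  else
    let block := ["# === YOUR CUSTOM COPIES (from custom/config.json) ==="]
      ++ share_copies.map copyLine ++ bin_copies.map copyLine
    let r := altGo block (((PySem.Str.split? content "\n").getD []).reverse) [] false
    if r.2 = false then content
    else PySem.Str.join "\n" r.1.reverse

-- ===== PRECONDITION & SPEC =====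
def Spec_inject_copies (content : String) (share_copies : List String) (bin_copies : List String) (out : String) : Prop := out = inject_copies_alt content share_copies bin_copies
instance (content : String) (share_copies : List String) (bin_copies : List String) (out : String) : Decidable (Spec_inject_copies content share_copies bin_copies out) := by unfold Spec_inject_copies; infer_instance

-- ===== CLAIM (what is proved, stated in full; the proofs are below) =====
def Claim_equal_inject_copies : Prop := ∀ (content : String) (share_copies : List String) (bin_copies : List String), Dom_inject_copies content share_copies bin_copies → Spec_inject_copies content share_copies bin_copies (inject_copies content share_copies bin_copies)

-- ===== LEMMAS AND PROOFS =====

-- the match predicate, shared shape of both ports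
def pvP (l : String) : Bool := PySem.Str.isIn "COPY --from=builder" l

theorem altGo_true (block rl acc : List String) :
    altGo block rl acc true = (acc ++ rl, true) := by
  induction rl generalizing acc with
  | nil => simp [altGo]
  | cons l rest ih => simp [altGo, ih]

theorem altGo_nomatch (block rl rest acc : List String)
    (h : ∀ l ∈ rl, pvP l = false) :
    altGo block (rl ++ rest) acc false = altGo block rest (acc ++ rl) false := by
  induction rl generalizing acc with
  | nil => simp
  | cons l t ih =>
    have hl := h l (by simp)
    simp only [List.cons_append, altGo, Bool.not_false, Bool.true_and]
    rw [if_neg (by simpa [pvP] using hl), ih _ (fun x hx => h x (by simp [hx]))]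
    simp

theorem altGo_match (block pre suf acc : List String) (m : String)
    (hm : pvP m = true)
    (hsuf : ∀ l ∈ suf, pvP l = false) :
    altGo block (suf.reverse ++ m :: pre.reverse) acc false
      = (acc ++ suf.reverse ++ block.reverse ++ [m] ++ pre.reverse, true) := by
  rw [altGo_nomatch _ _ _ _ (by intro l hl; exact hsuf l (by simpa using hl))]
  simp only [altGo, Bool.not_false, Bool.true_and]
  rw [if_pos (by simpa [pvP] using hm), altGo_true]

theorem foldl_max_le (t : List Int) (x v : Int) (hx : x ≤ v) (h : ∀ y ∈ t, y ≤ v) :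
    t.foldl max x ≤ v := by
  induction t generalizing x with
  | nil => simpa
  | cons a t ih =>
    exact ih (max x a) (max_le hx (h a (by simp))) (fun y hy => h y (by simp [hy]))

theorem max?_append_last (xs : List Int) (v : Int) (h : ∀ x ∈ xs, x ≤ v) :
    PySem.List.max? (xs ++ [v]) (fun x => x) = some v := by
  cases xs with
  | nil => rw [List.nil_append, PySem.List.max?_id_cons]; simp
  | cons x t =>
    rw [List.cons_append, PySem.List.max?_id_cons, List.foldl_append]
    have hle : t.foldl max x ≤ v :=
      foldl_max_le t x v (h x (by simp)) (fun y hy => h y (by simp [hy]))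
    simp [max_eq_right hle]

theorem last_match_decomp (L : List String) :
    (∀ l ∈ L, pvP l = false) ∨
      ∃ pre m suf, L = pre ++ m :: suf ∧ pvP m = true ∧ ∀ l ∈ suf, pvP l = false := by
  induction L using List.reverseRecOn with
  | nil => exact Or.inl (by simp)
  | append_singleton L a ih =>
    by_cases ha : pvP a = true
    · exact Or.inr ⟨L, a, [], by simp, ha, by simp⟩
    · rcases ih with hall | ⟨pre, m, suf, rfl, hm, hsuf⟩
      · refine Or.inl ?_
        intro l hl
        rcases (List.mem_append.1 hl) with h1 | h1
        · exact hall l h1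
        · simp only [List.mem_singleton] at h1; subst h1; simpa using ha
      · refine Or.inr ⟨pre, m, suf ++ [a], by simp, hm, ?_⟩
        intro l hl
        rcases (List.mem_append.1 hl) with h1 | h1
        · exact hsuf l h1
        · simp only [List.mem_singleton] at h1; subst h1; simpa using ha

theorem matches_nil_of_nomatch (suf : List String) (s : Int)
    (h : ∀ l ∈ suf, pvP l = false) :
    (PySem.List.enumerate suf s).filterMap
      (fun il => if PySem.Str.isIn "COPY --from=builder" il.2 then some il.1 else none) = [] := by
  rw [List.filterMap_eq_nil_iff]
  intro il hil
  obtain ⟨k, hk, rfl⟩ := (PySem.List.mem_enumerate_iff _ _ _).1 hil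
  have := h (suf[k]) (List.getElem_mem hk)
  simp only [pvP] at this
  simp at this
  simp [this]

theorem mem_matches_le (pre : List String) (s : Int) (x : Int)
    (hx : x ∈ (PySem.List.enumerate pre s).filterMap
      (fun il => if PySem.Str.isIn "COPY --from=builder" il.2 then some il.1 else none)) :
    x < s + (pre.length : Int) := by
  obtain ⟨il, hil, hfx⟩ := List.mem_filterMap.1 hx
  obtain ⟨k, hk, rfl⟩ := (PySem.List.mem_enumerate_iff _ _ _).1 hil
  simp only [Option.ite_none_right_eq_some, Option.some.injEq] at hfx
  omega

-- ===== VERDICT (by name: the statement is the Claim_ definition above) =====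
theorem inject_copies_spec : Claim_equal_inject_copies := by
  intro content share_copies bin_copies _
  unfold Spec_inject_copies
  by_cases hg : share_copies = [] ∧ bin_copies = []
  · simp [inject_copies, inject_copies_alt, hg]
  · simp only [inject_copies, inject_copies_alt, if_neg hg]
    set L := (PySem.Str.split? content "\n").getD [] with hL
    rcases last_match_decomp L with hall | ⟨pre, m, suf, hdec, hm, hsuf⟩
    · -- no builder-COPY line: both return content
      rw [matches_nil_of_nomatch L 0 hall]
      rw [show L.reverse = L.reverse ++ ([] : List String) by simp,
        altGo_nomatch _ L.reverse [] [] (by intro l hl; exact hall l (by simpa using hl))]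
      simp [altGo, PySem.List.max?]
    · -- L = pre ++ m :: suf with m the last matching line
      have hrev : L.reverse = suf.reverse ++ m :: pre.reverse := by
        rw [hdec]; simp
      rw [hrev, altGo_match _ _ _ _ _ hm hsuf]
      have hmatches :
          (PySem.List.enumerate L 0).filterMap
            (fun il => if PySem.Str.isIn "COPY --from=builder" il.2 then some il.1 else none)
            = ((PySem.List.enumerate pre 0).filterMap
                (fun il => if PySem.Str.isIn "COPY --from=builder" il.2 then some il.1 else none))
              ++ [(pre.length : Int)] := by
        rw [hdec, PySem.List.enumerate_append, List.filterMap_append,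
          PySem.List.enumerate_cons, List.filterMap_cons, matches_nil_of_nomatch suf _ hsuf]
        simp only [pvP] at hm
        simp at hm
        simp [hm]
      rw [hmatches, max?_append_last _ _
        (fun x hx => le_of_lt (by simpa using mem_matches_le pre 0 x hx))]
      have hne : ¬ ((pre.length : Int) = -1) := by omega
      rw [Option.getD_some, if_neg hne]
      have htoNat : ((pre.length : Int) + 1).toNat = pre.length + 1 := by omega
      rw [PySem.List.slice_to L (by omega), PySem.List.slice_from L (by omega), htoNat]
      have htake : L.take (pre.length + 1) = pre ++ [m] := by
        rw [hdec, show pre ++ m :: suf = (pre ++ [m]) ++ suf by simp]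
        exact List.take_left' (by simp)
      have hdrop : L.drop (pre.length + 1) = suf := by
        rw [hdec, show pre ++ m :: suf = (pre ++ [m]) ++ suf by simp]
        exact List.drop_left' (by simp)
      rw [htake, hdrop]
      simp
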